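-- pv_equiv track=rewrite | github.com/SvennoNito/ScoringHero | events/clip_borders.py | clip_borders
-- ===== SOURCE A (Python) =====
-- def clip_borders(borders, erase_ranges):
--     """Return borders with all given time ranges clipped out.
--
--     Parameters
--     ----------
--     borders : list of [start, end]
--     erase_ranges : list of (start, end) tuples
--
--     Returns
--     -------
--     list of [start, end] with the erased regions removed.
--     """
--     new_borders = []
--     for border in borders:
--         segments = [list(border)]
--         for e_start, e_end in erase_ranges:
--             clipped = []
--             for seg in segments:
--                 if e_end <= seg[0] or e_start >= seg[1]:
--                     clipped.append(seg)
--                 else: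
--                     if seg[0] < e_start:
--                         clipped.append([seg[0], e_start])
--                     if seg[1] > e_end:
--                         clipped.append([e_end, seg[1]])
--             segments = clipped
--         new_borders.extend(segments)
--     return new_borders
-- ===== SOURCE B (Python) =====
-- def clip_borders(borders, erase_ranges):
--     """Same clipping, but by direct recursion over the erase ranges per segment
--     (depth-first) instead of rebuilding the whole segment worklist per range."""
--     def clip(seg, i):
--         if i == len(erase_ranges):
--             return [seg]
--         s, e = erase_ranges[i]
--         if e <= seg[0] or s >= seg[1]:
--             return clip(seg, i + 1)
--         out = []
--         if seg[0] < s: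
--             out.extend(clip([seg[0], s], i + 1))
--         if seg[1] > e:
--             out.extend(clip([e, seg[1]], i + 1))
--         return out
--     result = []
--     for border in borders:
--         result.extend(clip(list(border), 0))
--     return result
-- ===== Notes on version B (the rewrite author's own statement) =====
-- stated objective: alternative
-- what changed: A rebuilds the whole segment worklist once per erase range (iterative breadth-first passes); B clips each border by a direct depth-first recursion over the erase ranges, splitting a segment and recursing on the remaining ranges.
import Mathlib
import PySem

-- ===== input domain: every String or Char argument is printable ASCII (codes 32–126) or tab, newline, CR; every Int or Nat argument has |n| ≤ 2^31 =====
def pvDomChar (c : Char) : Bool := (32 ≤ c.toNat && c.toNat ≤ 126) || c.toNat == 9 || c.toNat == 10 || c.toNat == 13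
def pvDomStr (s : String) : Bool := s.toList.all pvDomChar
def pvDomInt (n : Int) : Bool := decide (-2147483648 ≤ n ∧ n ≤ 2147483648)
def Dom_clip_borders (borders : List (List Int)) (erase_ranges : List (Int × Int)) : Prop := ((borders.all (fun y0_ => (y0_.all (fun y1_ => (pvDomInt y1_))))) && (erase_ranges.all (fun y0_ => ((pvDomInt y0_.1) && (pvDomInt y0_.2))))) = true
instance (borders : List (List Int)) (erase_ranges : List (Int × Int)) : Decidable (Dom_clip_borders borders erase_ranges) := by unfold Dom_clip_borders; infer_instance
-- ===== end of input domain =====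

-- B replaces A's per-range rebuild of the whole segment worklist by a direct
-- depth-first recursion over the erase ranges per segment (objective: alternative
-- decomposition of the same cost; same return values).

-- ===== PORT A =====
-- per-segment indexing seg[0]/seg[1] via pyGetD; Pre_ guarantees the index is in range
def clip_borders (borders : List (List Int)) (erase_ranges : List (Int × Int)) : List (List Int) :=
  borders.foldl (fun new_borders border =>
    new_borders ++
      erase_ranges.foldl (fun segments er =>
        segments.foldl (fun clipped seg =>
          if er.2 ≤ PySem.List.pyGetD seg 0 0 ∨ er.1 ≥ PySem.List.pyGetD seg 1 0 then
            clipped ++ [seg]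
          else
            let c1 := if PySem.List.pyGetD seg 0 0 < er.1 then
                        clipped ++ [[PySem.List.pyGetD seg 0 0, er.1]] else clipped
            if PySem.List.pyGetD seg 1 0 > er.2 then
              c1 ++ [[er.2, PySem.List.pyGetD seg 1 0]] else c1)
          []) [border]) []

-- ===== PORT B =====
-- B's helper clip(seg, i): recursion over the remaining erase ranges
def clipSeg (seg : List Int) (ranges : List (Int × Int)) : List (List Int) :=
  match ranges with
  | [] => [seg]
  | (s, e) :: rest =>
    if e ≤ PySem.List.pyGetD seg 0 0 ∨ s ≥ PySem.List.pyGetD seg 1 0 then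
      clipSeg seg rest
    else
      (if PySem.List.pyGetD seg 0 0 < s then
         clipSeg [PySem.List.pyGetD seg 0 0, s] rest else []) ++
      (if PySem.List.pyGetD seg 1 0 > e then
         clipSeg [e, PySem.List.pyGetD seg 1 0] rest else [])

def clip_borders_alt (borders : List (List Int)) (erase_ranges : List (Int × Int)) : List (List Int) :=
  borders.foldl (fun result border => result ++ clipSeg border erase_ranges) []

-- ===== PRECONDITION & SPEC =====
-- Pre_ excludes exactly the inputs where Python A raises IndexError (B raises there too):
-- with erase_ranges nonempty, a border of length 0, or of length 1 unless every erase
-- range ends at or before its single element (then seg[1] is never evaluated).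
def Pre_clip_borders (borders : List (List Int)) (erase_ranges : List (Int × Int)) : Prop :=
  erase_ranges = [] ∨ ∀ b ∈ borders, 2 ≤ b.length ∨ (b.length = 1 ∧ ∀ er ∈ erase_ranges, er.2 ≤ b.headI)
instance (borders : List (List Int)) (erase_ranges : List (Int × Int)) : Decidable (Pre_clip_borders borders erase_ranges) := by unfold Pre_clip_borders; infer_instance
def pvWitness_clip_borders : List (List Int) × (List (Int × Int)) := ([[0, 10], [12, 20]], [(2, 5), (15, 30)])

def Spec_clip_borders (borders : List (List Int)) (erase_ranges : List (Int × Int)) (out : List (List Int)) : Prop := out = clip_borders_alt borders erase_ranges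
instance (borders : List (List Int)) (erase_ranges : List (Int × Int)) (out : List (List Int)) : Decidable (Spec_clip_borders borders erase_ranges out) := by unfold Spec_clip_borders; infer_instance

-- ===== CLAIM (what is proved, stated in full; the proofs are below) =====
def Claim_equal_clip_borders : Prop := ∀ (borders : List (List Int)) (erase_ranges : List (Int × Int)), Dom_clip_borders borders erase_ranges → Pre_clip_borders borders erase_ranges → Spec_clip_borders borders erase_ranges (clip_borders borders erase_ranges)

-- ===== LEMMAS AND PROOFS =====

-- the pieces one erase range cuts one segment into (A's inner-loop body, as a function)
def pieceA (er : Int × Int) (seg : List Int) : List (List Int) :=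
  if er.2 ≤ PySem.List.pyGetD seg 0 0 ∨ er.1 ≥ PySem.List.pyGetD seg 1 0 then [seg]
  else
    (if PySem.List.pyGetD seg 0 0 < er.1 then [[PySem.List.pyGetD seg 0 0, er.1]] else []) ++
    (if PySem.List.pyGetD seg 1 0 > er.2 then [[er.2, PySem.List.pyGetD seg 1 0]] else [])

lemma stepA_eq_append (er : Int × Int) (clipped : List (List Int)) (seg : List Int) :
    (if er.2 ≤ PySem.List.pyGetD seg 0 0 ∨ er.1 ≥ PySem.List.pyGetD seg 1 0 then
      clipped ++ [seg]
    else
      let c1 := if PySem.List.pyGetD seg 0 0 < er.1 then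
                  clipped ++ [[PySem.List.pyGetD seg 0 0, er.1]] else clipped
      if PySem.List.pyGetD seg 1 0 > er.2 then
        c1 ++ [[er.2, PySem.List.pyGetD seg 1 0]] else c1) = clipped ++ pieceA er seg := by
  unfold pieceA
  split_ifs <;> simp

lemma inner_foldl_eq_flatMap (er : Int × Int) (segs : List (List Int)) :
    (segs.foldl (fun clipped seg =>
      if er.2 ≤ PySem.List.pyGetD seg 0 0 ∨ er.1 ≥ PySem.List.pyGetD seg 1 0 then
        clipped ++ [seg]
      else
        let c1 := if PySem.List.pyGetD seg 0 0 < er.1 then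
                    clipped ++ [[PySem.List.pyGetD seg 0 0, er.1]] else clipped
        if PySem.List.pyGetD seg 1 0 > er.2 then
          c1 ++ [[er.2, PySem.List.pyGetD seg 1 0]] else c1) []) = segs.flatMap (pieceA er) := by
  rw [PySem.List.foldl_congr_mem segs _ (fun clipped seg => clipped ++ pieceA er seg) []
        (fun acc x _ => stepA_eq_append er acc x),
      PySem.List.foldl_append_eq_flatMap]
  simp

lemma pieceA_flatMap_clipSeg (er : Int × Int) (rest : List (Int × Int)) (seg : List Int) :
    (pieceA er seg).flatMap (fun s => clipSeg s rest) = clipSeg seg (er :: rest) := by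
  obtain ⟨s, e⟩ := er
  conv_rhs => rw [clipSeg]
  unfold pieceA
  split_ifs <;> simp

lemma ranges_foldl_eq_flatMap (rs : List (Int × Int)) (segs : List (List Int)) :
    (rs.foldl (fun segments er =>
      segments.foldl (fun clipped seg =>
        if er.2 ≤ PySem.List.pyGetD seg 0 0 ∨ er.1 ≥ PySem.List.pyGetD seg 1 0 then
          clipped ++ [seg]
        else
          let c1 := if PySem.List.pyGetD seg 0 0 < er.1 then
                      clipped ++ [[PySem.List.pyGetD seg 0 0, er.1]] else clipped
          if PySem.List.pyGetD seg 1 0 > er.2 then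
            c1 ++ [[er.2, PySem.List.pyGetD seg 1 0]] else c1) []) segs)
      = segs.flatMap (fun s => clipSeg s rs) := by
  induction rs generalizing segs with
  | nil => simp [clipSeg]
  | cons er rest ih =>
    rw [List.foldl_cons, ih, inner_foldl_eq_flatMap, List.flatMap_assoc]
    exact List.flatMap_congr (fun s _ => pieceA_flatMap_clipSeg er rest s)

-- ===== VERDICT (by name: the statement is the Claim_ definition above) =====
theorem clip_borders_spec : Claim_equal_clip_borders := by
  intro borders erase_ranges _ _
  unfold Spec_clip_borders clip_borders clip_borders_alt
  refine PySem.List.foldl_congr_mem borders _ _ [] (fun acc border _ => ?_)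
  rw [ranges_foldl_eq_flatMap erase_ranges [border]]
  simp
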